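-- pv_equiv track=rewrite | github.com/YaverJavid/pydi | main.py | getOperators
-- ===== SOURCE A (Python) =====
-- arthOp = '+-*/%<>~^|&!'
--
-- def getOperators(expr):
--   operators = []
--   string = False
--   for c in expr:
--     if c == "'": string = not string
--     if string : continue
--     if c in arthOp:
--       if(c == '|'):
--         operators.append(' or ')
--       elif(c == '~'):
--         operators.append(' == ')
--       elif(c == '^'):
--         operators.append(' != ')
--       elif(c == '&'):
--         operators.append(' and ')
--       else:
--         operators.append(c)
--
--   return operators
-- ===== SOURCE B (Python) =====
-- arthOp = '+-*/%<>~^|&!'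
--
-- _TRANS = {'|': ' or ', '~': ' == ', '^': ' != ', '&': ' and '}
--
-- def getOperators(expr):
--   operators = []
--   for i, seg in enumerate(expr.split("'")):
--     if i % 2 == 1:
--       continue
--     for c in seg:
--       if c in arthOp:
--         operators.append(_TRANS.get(c, c))
--   return operators
-- ===== Notes on version B (the rewrite author's own statement) =====
-- stated objective: alternative
-- what changed: B splits the expression at single quotes and translates operator characters only in the even-indexed (outside-string) segments via a translation dict, replacing A's per-character boolean quote-toggle loop.
import Mathlib
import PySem

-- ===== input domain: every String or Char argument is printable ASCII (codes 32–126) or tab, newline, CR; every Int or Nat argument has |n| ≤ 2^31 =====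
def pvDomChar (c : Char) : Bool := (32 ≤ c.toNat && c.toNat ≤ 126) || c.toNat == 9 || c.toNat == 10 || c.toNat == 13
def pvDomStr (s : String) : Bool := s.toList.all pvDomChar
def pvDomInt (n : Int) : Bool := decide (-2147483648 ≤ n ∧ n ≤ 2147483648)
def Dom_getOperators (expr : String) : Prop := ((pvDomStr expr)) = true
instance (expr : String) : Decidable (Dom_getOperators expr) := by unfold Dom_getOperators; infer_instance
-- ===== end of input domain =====

-- B replaces A's per-character quote-toggle loop by splitting the expression at quotes
-- and translating only the even-indexed (outside-string) segments (objective: alternative).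


-- ===== PORT A =====
-- arthOp = '+-*/%<>~^|&!'  (c in arthOp for a single char = membership)
def arthOpChars : List Char := "+-*/%<>~^|&!".toList

-- loop body of A (one character step, same state: collected operators × string flag)
def pvStepA (st : List String × Bool) (c : Char) : List String × Bool :=
  let string := if c == '\'' then !st.2 else st.2
  if string then (st.1, string)
  else if arthOpChars.contains c then
    (st.1 ++ [if c == '|' then " or "
              else if c == '~' then " == "
              else if c == '^' then " != "
              else if c == '&' then " and "
              else String.mk [c]], string)
  else (st.1, string)

def getOperators (expr : String) : List String :=
  (expr.toList.foldl pvStepA ([], false)).1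

-- ===== PORT B =====
-- _TRANS = {'|': ' or ', '~': ' == ', '^': ' != ', '&': ' and '}
def pvTransDict : PySem.Dict Char String :=
  ⟨[('|', " or "), ('~', " == "), ('^', " != "), ('&', " and ")]⟩

def getOperators_alt (expr : String) : List String :=
  (PySem.List.enumerate (PySem.Chars.splitOn expr.toList ['\''])).foldl
    (fun acc p =>
      if PySem.Int.mod p.1 2 == 1 then acc
      else p.2.foldl
        (fun a c => if arthOpChars.contains c
                    then a ++ [PySem.Dict.getD pvTransDict c (String.mk [c])]
                    else a) acc)
    []

-- ===== PRECONDITION & SPEC =====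
def Spec_getOperators (expr : String) (out : List String) : Prop := out = getOperators_alt expr
instance (expr : String) (out : List String) : Decidable (Spec_getOperators expr out) := by unfold Spec_getOperators; infer_instance

-- ===== CLAIM (what is proved, stated in full; the proofs are below) =====
def Claim_equal_getOperators : Prop := ∀ (expr : String), Dom_getOperators expr → Spec_getOperators expr (getOperators expr)

-- ===== LEMMAS AND PROOFS =====

-- canonical translation of one operator char (B's dict lookup with default)
def transC (c : Char) : String := PySem.Dict.getD pvTransDict c (String.mk [c])

-- A's loop as a list-building recursion
def aRec : List Char → Bool → List String
  | [], _ => []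
  | c :: cs, s =>
    let s' := if c = '\'' then !s else s
    if s' then aRec cs s'
    else (if arthOpChars.contains c then [transC c] else []) ++ aRec cs s'

-- structural characterization of split at quotes
def mySplit : List Char → List (List Char)
  | [] => [[]]
  | c :: cs =>
    if c = '\'' then [] :: mySplit cs
    else (c :: (mySplit cs).headI) :: (mySplit cs).tail

-- B's segment processing with a parity flag (b = current segment is inside a string)
def procB : List (List Char) → Bool → List String
  | [], _ => []
  | seg :: rest, b =>
    (if b then [] else (seg.filter (arthOpChars.contains ·)).map transC) ++ procB rest (!b)

theorem transA_eq_transC (c : Char) :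
    (if c = '|' then " or "
     else if c = '~' then " == "
     else if c = '^' then " != "
     else if c = '&' then " and "
     else String.mk [c]) = transC c := by
  by_cases h1 : c = '|'
  · subst h1; decide
  by_cases h2 : c = '~'
  · subst h2; decide
  by_cases h3 : c = '^'
  · subst h3; decide
  by_cases h4 : c = '&'
  · subst h4; decide
  have b1 : ('|' == c) = false := beq_eq_false_iff_ne.mpr (Ne.symm h1)
  have b2 : ('~' == c) = false := beq_eq_false_iff_ne.mpr (Ne.symm h2)
  have b3 : ('^' == c) = false := beq_eq_false_iff_ne.mpr (Ne.symm h3)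
  have b4 : ('&' == c) = false := beq_eq_false_iff_ne.mpr (Ne.symm h4)
  simp [transC, PySem.Dict.getD, PySem.Dict.get?, pvTransDict, List.find?,
        h1, h2, h3, h4, b1, b2, b3, b4]

theorem foldlA_eq_aRec (l : List Char) (acc : List String) (s : Bool) :
    (l.foldl pvStepA (acc, s)).1 = acc ++ aRec l s := by
  induction l generalizing acc s with
  | nil => simp [aRec]
  | cons c cs ih =>
    rw [List.foldl_cons]
    by_cases hc : c = '\''
    · subst hc
      have hno : '\'' ∉ arthOpChars := by decide
      cases s
      · rw [show pvStepA (acc, false) '\'' = (acc, true) from by simp [pvStepA]]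
        rw [ih]; simp [aRec]
      · rw [show pvStepA (acc, true) '\'' = (acc, false) from by simp [pvStepA, hno]]
        rw [ih]; simp [aRec, hno]
    · cases s
      · by_cases hm : c ∈ arthOpChars
        · rw [show pvStepA (acc, false) c = (acc ++ [transC c], false) from by
            simp [pvStepA, hc, hm, transA_eq_transC]]
          rw [ih]; simp [aRec, hc, hm]
        · rw [show pvStepA (acc, false) c = (acc, false) from by simp [pvStepA, hc, hm]]
          rw [ih]; simp [aRec, hc, hm]
      · rw [show pvStepA (acc, true) c = (acc, true) from by simp [pvStepA, hc]]
        rw [ih]; simp [aRec, hc]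

theorem mySplit_ne_nil (l : List Char) : mySplit l ≠ [] := by
  cases l with
  | nil => simp [mySplit]
  | cons c cs => simp only [mySplit]; split <;> simp

theorem mySplit_cons_head_tail (l : List Char) :
    mySplit l = (mySplit l).headI :: (mySplit l).tail := by
  rcases h : mySplit l with _ | ⟨a, t⟩
  · exact absurd h (mySplit_ne_nil l)
  · simp

theorem go_eq_mySplit (l : List Char) (fuel : Nat) (cur : List Char)
    (acc : List (List Char)) (h : l.length < fuel) :
    PySem.Chars.splitOn.go ['\''] fuel l cur acc =
      acc.reverse ++ (cur.reverse ++ (mySplit l).headI) :: (mySplit l).tail := by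
  induction l generalizing fuel cur acc with
  | nil =>
    cases fuel with
    | zero => omega
    | succ f => simp [PySem.Chars.splitOn.go, mySplit]
  | cons c cs ih =>
    cases fuel with
    | zero => omega
    | succ f =>
      simp only [PySem.Chars.splitOn.go]
      by_cases hc : c = '\''
      · subst hc
        have hp : List.isPrefixOf ['\''] ('\'' :: cs) = true := by
          simp [List.isPrefixOf]
        simp only [hp, if_pos, List.length_cons, List.length_nil,
          List.drop_succ_cons, List.drop_zero]
        rw [ih f [] _ (by simp at h; omega)]
        rcases hsp : mySplit cs with _ | ⟨hd, tl⟩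
        · exact absurd hsp (mySplit_ne_nil cs)
        · simp [mySplit, hsp]
      · have hp : List.isPrefixOf ['\''] (c :: cs) = false := by
          simp [List.isPrefixOf]
          intro hcc; exact hc hcc.symm
        simp only [hp]
        rw [if_neg (by simp)]
        rw [ih _ (c :: cur) _ (by simpa using Nat.lt_of_succ_lt_succ h)]
        simp [mySplit, hc]

theorem splitOn_eq_mySplit (l : List Char) :
    PySem.Chars.splitOn l ['\''] = mySplit l := by
  unfold PySem.Chars.splitOn
  rw [go_eq_mySplit l (l.length + 1) [] [] (by omega)]
  simpa using (mySplit_cons_head_tail l).symm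

theorem parity_step (n : Int) :
    (PySem.Int.mod (n + 1) 2 == 1) = !(PySem.Int.mod n 2 == 1) := by
  rw [PySem.Int.mod_eq_emod_of_pos (by norm_num), PySem.Int.mod_eq_emod_of_pos (by norm_num)]
  by_cases h : n % 2 = 1
  · have h2 : (n + 1) % 2 = 0 := by omega
    simp [h, h2]
  · have h0 : n % 2 = 0 := by omega
    have h2 : (n + 1) % 2 = 1 := by omega
    simp [h0, h2]

theorem foldlB_eq_procB (xs : List (List Char)) (n : Int) (acc : List String) (b : Bool)
    (hb : (PySem.Int.mod n 2 == 1) = b) :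
    ((PySem.List.enumerate xs n).foldl
      (fun acc p =>
        if PySem.Int.mod p.1 2 == 1 then acc
        else p.2.foldl
          (fun a c => if arthOpChars.contains c
                      then a ++ [PySem.Dict.getD pvTransDict c (String.mk [c])]
                      else a) acc)
      acc) = acc ++ procB xs b := by
  induction xs generalizing n acc b with
  | nil => simp [PySem.List.enumerate, procB]
  | cons seg rest ih =>
    simp only [PySem.List.enumerate, List.foldl_cons, hb]
    rw [ih (n + 1) _ (!b) (by rw [parity_step, hb])]
    cases b with
    | true => simp [procB]
    | false =>
      simp only [Bool.false_eq_true, if_false, procB, Bool.not_false]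
      rw [show (fun (a : List String) (c : Char) =>
            if arthOpChars.contains c = true then
              a ++ [PySem.Dict.getD pvTransDict c (String.mk [c])] else a)
          = (fun (acc : List String) (x : Char) =>
            if (fun x => arthOpChars.contains x) x = true then acc ++ [transC x] else acc)
          from rfl]
      rw [PySem.List.foldl_append_if (fun x => arthOpChars.contains x) transC seg acc]
      simp [List.append_assoc]

theorem aRec_eq_procB (l : List Char) (s : Bool) :
    aRec l s = procB (mySplit l) s := by
  induction l generalizing s with
  | nil => cases s <;> simp [aRec, mySplit, procB]
  | cons c cs ih =>
    rcases hsp : mySplit cs with _ | ⟨hd, tl⟩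
    · exact absurd hsp (mySplit_ne_nil cs)
    · by_cases hc : c = '\''
      · subst hc
        have hno : '\'' ∉ arthOpChars := by decide
        cases s <;> simp [aRec, mySplit, procB, hno, ih, hsp]
      · cases s <;> by_cases hm : c ∈ arthOpChars <;>
          simp [aRec, mySplit, procB, hc, hm, ih, hsp]

-- ===== VERDICT (by name: the statement is the Claim_ definition above) =====
theorem getOperators_spec : Claim_equal_getOperators := by
  intro expr _
  unfold Spec_getOperators getOperators getOperators_alt
  rw [foldlA_eq_aRec, splitOn_eq_mySplit,
      foldlB_eq_procB _ 0 [] false (by decide)]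
  simpa using aRec_eq_procB expr.toList false
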